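-- pv_equiv track=rewrite | github.com/LIAAD/Text2StoryPackage | text2story/experiments/metrics.py | search_annotation
-- ===== SOURCE A (Python) =====
-- def search_annotation(ann, ann_lst):
--     """
--     given  an annotation (dictionary), do a binary search in a list of annotations
--     if the tokens are in the annotation list
--
--     @param (int, int): a tuple of integers that indicates an intervals
--     @param [(int,int, int)]: a list of intervals
--
--     @return int: return a integer that is the index position of the element, or -1
--     if the interval is absence of ann_lst
--     """
--
--     ans = -1
--     # ans = len(word_tokenize(ann["value"]))
--     start, end = ann["offset1"]
--     b = 0
--     e = len(ann_lst) - 1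
--     m = int((b + e) / 2)
--     idkey = None
--
--     while (b <= e):
--         start_search, end_search, idkey = ann_lst[m]
--         if end < start_search:
--             e = m - 1
--             m = int((b + e) / 2)
--         else:
--             if start > end_search:
--                 b = m + 1
--                 m = int((b + e) / 2)
--             else:
--                 if start == start_search and end == end_search:
--                     ans = m
--                 break
--
--     return ans, idkey
-- ===== SOURCE B (Python) =====
-- def search_annotation(ann, ann_lst):
--     """Same binary search expressed as a recursive divide-and-conquer over the
--     interval [b, e], threading the last-probed idkey through the recursion."""
--     start, end = ann["offset1"]
--
--     def go(b, e, idkey):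
--         if b > e:
--             return -1, idkey
--         m = (b + e) // 2
--         ss, es, k = ann_lst[m]
--         if end < ss:
--             return go(b, m - 1, k)
--         if start > es:
--             return go(m + 1, e, k)
--         return (m if start == ss and end == es else -1), k
--
--     return go(0, len(ann_lst) - 1, None)
-- ===== Notes on version B (the rewrite author's own statement) =====
-- stated objective: alternative
-- what changed: The imperative while-loop that mutates b/e and recomputes m in state is replaced by a recursive divide-and-conquer go(b,e,idkey) that computes the midpoint at the head of each call and threads the last-probed idkey through the recursion.
import Mathlib
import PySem

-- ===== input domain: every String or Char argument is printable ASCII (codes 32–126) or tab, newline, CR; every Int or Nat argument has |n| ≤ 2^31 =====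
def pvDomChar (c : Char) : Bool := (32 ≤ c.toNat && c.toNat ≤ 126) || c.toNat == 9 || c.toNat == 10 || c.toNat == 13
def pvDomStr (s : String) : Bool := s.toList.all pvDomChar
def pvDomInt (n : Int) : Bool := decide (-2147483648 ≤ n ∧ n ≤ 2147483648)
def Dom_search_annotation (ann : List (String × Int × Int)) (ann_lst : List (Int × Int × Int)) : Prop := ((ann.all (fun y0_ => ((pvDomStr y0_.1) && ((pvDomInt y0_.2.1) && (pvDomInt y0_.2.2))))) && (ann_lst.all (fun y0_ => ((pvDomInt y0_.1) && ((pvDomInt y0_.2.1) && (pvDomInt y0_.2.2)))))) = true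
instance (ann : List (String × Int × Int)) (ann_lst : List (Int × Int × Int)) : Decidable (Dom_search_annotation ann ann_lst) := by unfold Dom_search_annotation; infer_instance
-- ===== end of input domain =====

-- B replaces A's imperative while-loop (mutating b/e and recomputing m in state) by a
-- recursive divide-and-conquer go(b,e,idkey) computing the midpoint per call; same cost.

-- ===== PORT A =====

-- int(n/2): truncation toward zero; exact for the |n| ≤ 2^32 sums arising under Dom (float is exact there)
def pyHalf (n : Int) : Int := n.tdiv 2

-- A's while-loop; fuel only makes the recursion total (the loop shrinks e-b each step,
-- so length+1 fuel is never exhausted from search_annotation).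
-- ann_lst[m] is ported as pyGetD with a dummy default: in every state reached from
-- search_annotation, 0 ≤ m < ann_lst.length, so the default is never used (exact).
def searchLoopA (lst : List (Int × Int × Int)) (start end_ : Int) :
    Nat → Int → Int → Int → Option Int → Int × Option Int
  | 0, _, _, _, idkey => (-1, idkey)
  | fuel+1, b, e, m, idkey =>
    if b ≤ e then
      let t := PySem.List.pyGetD lst m (0, 0, 0)
      let start_search := t.1
      let end_search := t.2.1
      let idkey' := t.2.2
      if end_ < start_search then
        searchLoopA lst start end_ fuel b (m - 1) (pyHalf (b + (m - 1))) idkey'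
      else if start > end_search then
        searchLoopA lst start end_ fuel (m + 1) e (pyHalf ((m + 1) + e)) idkey'
      else ((if start = start_search ∧ end_ = end_search then m else -1), idkey')
    else (-1, idkey)

def search_annotation (ann : List (String × Int × Int)) (ann_lst : List (Int × Int × Int)) : Int × Option Int :=
  match PySem.Dict.get? (PySem.Dict.mk ann) "offset1" with
  | none => (-1, none)   -- Python raises KeyError here; excluded by Pre_search_annotation
  | some (start, end_) =>
    let b : Int := 0
    let e : Int := (ann_lst.length : Int) - 1
    searchLoopA ann_lst start end_ (ann_lst.length + 1) b e (pyHalf (b + e)) none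

-- ===== PORT B =====

-- needed by goB's decreasing_by, hence stated above the claim block
theorem floordiv2_bounds (b e : Int) (h : b ≤ e) :
    b ≤ PySem.Int.floordiv (b + e) 2 ∧ PySem.Int.floordiv (b + e) 2 ≤ e := by
  have h2 : Int.fdiv (b + e) 2 = (b + e) / 2 := by
    rw [Int.fdiv_eq_ediv]; simp
  simp only [PySem.Int.floordiv, h2]; omega

-- recursive divide-and-conquer; ann_lst[m] as pyGetD: 0 ≤ m < length whenever reached
-- from search_annotation_alt, so the dummy default is never used (exact).
def goB (lst : List (Int × Int × Int)) (start end_ : Int) (b e : Int) (idkey : Option Int) : Int × Option Int :=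
  if hbe : b > e then (-1, idkey)
  else
    let m := PySem.Int.floordiv (b + e) 2
    let t := PySem.List.pyGetD lst m (0, 0, 0)
    if end_ < t.1 then goB lst start end_ b (m - 1) t.2.2
    else if start > t.2.1 then goB lst start end_ (m + 1) e t.2.2
    else ((if start = t.1 ∧ end_ = t.2.1 then m else -1), t.2.2)
termination_by (e - b + 1).toNat
decreasing_by
  · have := floordiv2_bounds b e (by omega); omega
  · have := floordiv2_bounds b e (by omega); omega

def search_annotation_alt (ann : List (String × Int × Int)) (ann_lst : List (Int × Int × Int)) : Int × Option Int :=
  match PySem.Dict.get? (PySem.Dict.mk ann) "offset1" with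
  | none => (-1, none)   -- Python raises KeyError here; excluded by Pre_search_annotation
  | some (start, end_) => goB ann_lst start end_ 0 ((ann_lst.length : Int) - 1) none

-- ===== PRECONDITION & SPEC =====
-- Pre_ excludes exactly the inputs whose dict has no "offset1" key: Python A (and B) raise KeyError there.
def Pre_search_annotation (ann : List (String × Int × Int)) (ann_lst : List (Int × Int × Int)) : Prop :=
  (PySem.Dict.get? (PySem.Dict.mk ann) "offset1").isSome = true
instance (ann : List (String × Int × Int)) (ann_lst : List (Int × Int × Int)) : Decidable (Pre_search_annotation ann ann_lst) := by unfold Pre_search_annotation; infer_instance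

def pvWitness_search_annotation : (List (String × Int × Int)) × (List (Int × Int × Int)) :=
  ([("offset1", 1, 2)], [(1, 2, 7)])

def Spec_search_annotation (ann : List (String × Int × Int)) (ann_lst : List (Int × Int × Int)) (out : Int × Option Int) : Prop := out = search_annotation_alt ann ann_lst
instance (ann : List (String × Int × Int)) (ann_lst : List (Int × Int × Int)) (out : Int × Option Int) : Decidable (Spec_search_annotation ann ann_lst out) := by unfold Spec_search_annotation; infer_instance

-- ===== CLAIM (what is proved, stated in full; the proofs are below) =====
def Claim_equal_search_annotation : Prop := ∀ (ann : List (String × Int × Int)) (ann_lst : List (Int × Int × Int)), Dom_search_annotation ann ann_lst → Pre_search_annotation ann ann_lst → Spec_search_annotation ann ann_lst (search_annotation ann ann_lst)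

-- ===== LEMMAS AND PROOFS =====

-- on states with 0 ≤ b, int((b+e)/2) and (b+e)//2 agree
theorem pyHalf_eq_floordiv (b e : Int) (hb : 0 ≤ b) (h : b ≤ e) :
    pyHalf (b + e) = PySem.Int.floordiv (b + e) 2 := by
  have h2 : Int.fdiv (b + e) 2 = (b + e) / 2 := by
    rw [Int.fdiv_eq_ediv]; simp
  simp only [pyHalf, PySem.Int.floordiv, h2, Int.tdiv_eq_ediv_of_nonneg (by omega : (0:Int) ≤ b + e)]

theorem loop_eq (lst : List (Int × Int × Int)) (s t : Int) :
    ∀ (fuel : Nat) (b e : Int) (idkey : Option Int), 0 ≤ b → (e - b + 1).toNat < fuel →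
    searchLoopA lst s t fuel b e (pyHalf (b + e)) idkey = goB lst s t b e idkey := by
  intro fuel
  induction fuel with
  | zero => intro b e idkey _ h; omega
  | succ n ih =>
    intro b e idkey hb hf
    rw [searchLoopA, goB]
    by_cases hbe : b ≤ e
    · have hm := floordiv2_bounds b e hbe
      rw [pyHalf_eq_floordiv b e hb hbe]
      simp only [if_pos hbe, dif_neg (by omega : ¬ b > e)]
      set m := PySem.Int.floordiv (b + e) 2 with hmdef
      set p := PySem.List.pyGetD lst m (0, 0, 0) with hpdef
      by_cases h1 : t < p.1
      · simp only [if_pos h1]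
        exact ih b (m - 1) p.2.2 hb (by omega)
      · simp only [if_neg h1]
        by_cases h2 : s > p.2.1
        · simp only [if_pos h2]
          exact ih (m + 1) e p.2.2 (by omega) (by omega)
        · simp only [if_neg h2]
    · simp only [if_neg hbe, dif_pos (by omega : b > e)]

-- ===== VERDICT (by name: the statement is the Claim_ definition above) =====
theorem search_annotation_spec : Claim_equal_search_annotation := by
  intro ann ann_lst _ hpre
  unfold Spec_search_annotation search_annotation search_annotation_alt
  unfold Pre_search_annotation at hpre
  cases hget : PySem.Dict.get? (PySem.Dict.mk ann) "offset1" with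
  | none => rw [hget] at hpre
  | some v =>
    obtain ⟨s, t⟩ := v
    have hlen : (0 : Int) ≤ 0 := le_refl 0
    exact loop_eq ann_lst s t (ann_lst.length + 1) 0 ((ann_lst.length : Int) - 1) none hlen (by omega)
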